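-- pv_equiv track=rewrite | github.com/kishoreUdatha/BharatBuild_AI | backend/app/services/workspace_restore.py | _validate_critical_files
-- ===== SOURCE A (Python) =====
-- from typing import Dict, List, Optional, Tuple, Set
--
-- CRITICAL_FILES_BY_TYPE = {
--     "node": {
--         "required": ["package.json"],  # Must have package.json
--         "optional_entry": ["src/index.tsx", "src/index.ts", "src/index.js", "src/App.tsx", "src/App.js", "index.html", "src/main.tsx", "src/main.ts"],
--     },
--     "vite": {
--         "required": ["package.json"],
--         "any_of": ["vite.config.ts", "vite.config.js"],  # At least one vite config
--         "optional_entry": ["index.html", "src/main.tsx", "src/main.ts", "src/App.tsx"],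
--     },
--     "python": {
--         "required": [],  # At least one of these
--         "any_of": ["requirements.txt", "pyproject.toml", "setup.py"],
--         "optional_entry": ["main.py", "app.py", "app/main.py", "src/main.py"],
--     },
--     "java": {
--         "required": [],
--         "any_of": ["pom.xml", "build.gradle", "build.gradle.kts"],
--         "optional_entry": ["src/main/java"],
--     },
--     "go": {
--         "required": ["go.mod"],
--         "optional_entry": ["main.go", "cmd/main.go"],
--     },
--     "static": {
--         "required": ["index.html"],
--         "optional_entry": [],
--     },
-- }
--
-- def _validate_critical_files(
--
--     restored_files: Set[str],
--     project_type: str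
-- ) -> Tuple[bool, List[str]]:
--     """
--     Validate that all critical files were restored.
--
--     Supports both frontend-only and full-stack projects by checking
--     critical files at root level AND in common subdirectories.
--
--     Args:
--         restored_files: Set of file paths that were restored
--         project_type: Type of project (node, python, etc.)
--
--     Returns:
--         Tuple of (is_valid, missing_critical_files)
--     """
--     config = CRITICAL_FILES_BY_TYPE.get(project_type, CRITICAL_FILES_BY_TYPE["node"])
--
--     missing = []
--
--     # Common subdirectories for full-stack projects
--     # Full-stack projects often have frontend code in subdirectories
--     COMMON_SUBDIRS = ["", "frontend/", "client/", "web/", "app/", "src/"]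
--
--     def file_exists_anywhere(filename: str) -> bool:
--         """Check if file exists at root or in common subdirectories."""
--         for subdir in COMMON_SUBDIRS:
--             if f"{subdir}{filename}" in restored_files:
--                 return True
--         return False
--
--     # Check required files (ALL must exist - at root or subdirectory)
--     for required_file in config.get("required", []):
--         # Check at root level and in common subdirectories
--         if file_exists_anywhere(required_file):
--             continue
--         missing.append(required_file)
--
--     # Check any_of files (AT LEAST ONE must exist - at root or subdirectory)
--     any_of = config.get("any_of", [])
--     if any_of:
--         if not any(file_exists_anywhere(f) for f in any_of):
--             missing.append(f"one of: {', '.join(any_of)}")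
--
--     # Check optional entry points (warn but don't fail)
--     # optional_entry = config.get("optional_entry", [])
--     # These are just warnings, not critical
--
--     return len(missing) == 0, missing
-- ===== SOURCE B (Python) =====
-- from typing import List, Set, Tuple
--
-- CRITICAL_FILES_BY_TYPE = {
--     "node": {
--         "required": ["package.json"],
--         "optional_entry": ["src/index.tsx", "src/index.ts", "src/index.js", "src/App.tsx", "src/App.js", "index.html", "src/main.tsx", "src/main.ts"],
--     },
--     "vite": {
--         "required": ["package.json"],
--         "any_of": ["vite.config.ts", "vite.config.js"],
--         "optional_entry": ["index.html", "src/main.tsx", "src/main.ts", "src/App.tsx"],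
--     },
--     "python": {
--         "required": [],
--         "any_of": ["requirements.txt", "pyproject.toml", "setup.py"],
--         "optional_entry": ["main.py", "app.py", "app/main.py", "src/main.py"],
--     },
--     "java": {
--         "required": [],
--         "any_of": ["pom.xml", "build.gradle", "build.gradle.kts"],
--         "optional_entry": ["src/main/java"],
--     },
--     "go": {
--         "required": ["go.mod"],
--         "optional_entry": ["main.go", "cmd/main.go"],
--     },
--     "static": {
--         "required": ["index.html"],
--         "optional_entry": [],
--     },
-- }
--
-- # The validation rules as a CNF: one clause (list of acceptable alternatives) per
-- # requirement, in the order the messages must appear.  Each required file is its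
-- # own singleton clause; an any_of list is one multi-alternative clause.
-- _CHECKS_BY_TYPE = {
--     t: [[r] for r in cfg.get("required", [])] + ([cfg["any_of"]] if cfg.get("any_of") else [])
--     for t, cfg in CRITICAL_FILES_BY_TYPE.items()
-- }
--
-- _PREFIXES = ("", "frontend/", "client/", "web/", "app/", "src/")
--
--
-- def _validate_critical_files(restored_files: Set[str], project_type: str) -> Tuple[bool, List[str]]:
--     checks = _CHECKS_BY_TYPE.get(project_type, _CHECKS_BY_TYPE["node"])
--
--     # Strip every known subdir prefix off every restored path once, giving the
--     # set of bare names under which a restored file can satisfy a requirement.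
--     bare = {path[len(p):] for path in restored_files for p in _PREFIXES if path.startswith(p)}
--
--     # A clause fails when the bare-name set is disjoint from its alternatives.
--     missing = [alts[0] if len(alts) == 1 else f"one of: {', '.join(alts)}"
--                for alts in checks if bare.isdisjoint(alts)]
--
--     return not missing, missing
-- ===== Notes on version B (the rewrite author's own statement) =====
-- stated objective: alternative
-- what changed: B recasts the config as a CNF list of clauses (each required file a singleton clause, any_of one clause) and, instead of probing every subdir-prefixed variant of each candidate against the restored set, builds the set of prefix-stripped bare names from restored_files in one pass and keeps the clauses disjoint from it, rendering each failed clause as its message; the required-loop/any_of-branch structure and the per-candidate probe helper disappear.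
import Mathlib
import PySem

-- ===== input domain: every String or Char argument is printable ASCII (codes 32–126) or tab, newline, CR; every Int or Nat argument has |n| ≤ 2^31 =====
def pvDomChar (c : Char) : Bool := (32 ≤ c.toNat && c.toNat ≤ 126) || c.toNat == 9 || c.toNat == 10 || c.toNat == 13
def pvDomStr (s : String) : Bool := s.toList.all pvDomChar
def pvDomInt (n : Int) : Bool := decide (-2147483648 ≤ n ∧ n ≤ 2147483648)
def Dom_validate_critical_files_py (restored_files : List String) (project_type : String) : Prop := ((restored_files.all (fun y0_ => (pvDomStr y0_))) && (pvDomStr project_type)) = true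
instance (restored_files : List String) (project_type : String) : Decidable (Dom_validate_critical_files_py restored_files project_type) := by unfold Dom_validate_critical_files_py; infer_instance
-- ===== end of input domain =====

-- B recasts the config as CNF clauses and strips subdir prefixes off the restored
-- paths once into a bare-name set, keeping clauses disjoint from it, instead of
-- probing every subdir-prefixed variant of each candidate (objective: alternative).


-- ===== PORT A =====
-- CRITICAL_FILES_BY_TYPE.get(project_type, ...["node"]) read as (required, any_of)
def pvConfigA (project_type : String) : List String × List String :=
  if project_type == "node" then (["package.json"], [])
  else if project_type == "vite" then (["package.json"], ["vite.config.ts", "vite.config.js"])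
  else if project_type == "python" then ([], ["requirements.txt", "pyproject.toml", "setup.py"])
  else if project_type == "java" then ([], ["pom.xml", "build.gradle", "build.gradle.kts"])
  else if project_type == "go" then (["go.mod"], [])
  else if project_type == "static" then (["index.html"], [])
  else (["package.json"], [])

def pvSubdirsA : List String := ["", "frontend/", "client/", "web/", "app/", "src/"]

def pvFileExistsAnywhereA (restored_files : List String) (filename : String) : Bool :=
  pvSubdirsA.any (fun subdir => restored_files.contains (subdir ++ filename))

def validate_critical_files_py (restored_files : List String) (project_type : String) : Bool × List String :=
  let config := pvConfigA project_type
  let missing : List String :=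
    config.1.foldl (fun acc r => if pvFileExistsAnywhereA restored_files r then acc else acc ++ [r]) []
  let any_of := config.2
  let missing :=
    if !any_of.isEmpty && !(any_of.any (fun f => pvFileExistsAnywhereA restored_files f)) then
      missing ++ ["one of: " ++ PySem.Str.join ", " any_of]
    else missing
  (missing.length == 0, missing)

-- ===== PORT B =====
-- _CHECKS_BY_TYPE.get(project_type, _CHECKS_BY_TYPE["node"]): the rules as CNF clauses
def pvChecksB (project_type : String) : List (List String) :=
  if project_type == "node" then [["package.json"]]
  else if project_type == "vite" then [["package.json"], ["vite.config.ts", "vite.config.js"]]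
  else if project_type == "python" then [["requirements.txt", "pyproject.toml", "setup.py"]]
  else if project_type == "java" then [["pom.xml", "build.gradle", "build.gradle.kts"]]
  else if project_type == "go" then [["go.mod"]]
  else if project_type == "static" then [["index.html"]]
  else [["package.json"]]

-- {path[len(p):] for path in restored_files for p in _PREFIXES if path.startswith(p)}
def pvBareB (restored_files : List String) : PySem.Set String :=
  PySem.Set.ofList (restored_files.flatMap (fun path =>
    ((["", "frontend/", "client/", "web/", "app/", "src/"] : List String).filter
        (fun p => PySem.Str.startswith path p)).map
      (fun p => PySem.Str.slice path (some (PySem.Str.len p)) none)))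

-- alts[0] when len(alts) == 1 (the getD default is unreachable: alts has an element)
def pvRenderB (alts : List String) : String :=
  if alts.length == 1 then (PySem.List.pyGet? alts 0).getD ""
  else "one of: " ++ PySem.Str.join ", " alts

def validate_critical_files_py_alt (restored_files : List String) (project_type : String) : Bool × List String :=
  let checks := pvChecksB project_type
  let bare := pvBareB restored_files
  let missing :=
    (checks.filter (fun alts => PySem.Set.isdisjoint bare alts)).map pvRenderB
  (missing.isEmpty, missing)

-- ===== PRECONDITION & SPEC =====
def Spec_validate_critical_files_py (restored_files : List String) (project_type : String) (out : Bool × List String) : Prop := out = validate_critical_files_py_alt restored_files project_type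
instance (restored_files : List String) (project_type : String) (out : Bool × List String) : Decidable (Spec_validate_critical_files_py restored_files project_type out) := by unfold Spec_validate_critical_files_py; infer_instance

-- ===== CLAIM (what is proved, stated in full; the proofs are below) =====
def Claim_equal_validate_critical_files_py : Prop := ∀ (restored_files : List String) (project_type : String), Dom_validate_critical_files_py restored_files project_type → Spec_validate_critical_files_py restored_files project_type (validate_critical_files_py restored_files project_type)

-- ===== LEMMAS AND PROOFS =====

-- s starts with p and stripping p leaves f  ↔  s is exactly p ++ f
lemma pv_strip_eq_iff (s p f : String) :
    (PySem.Str.startswith s p = true ∧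
      PySem.Str.slice s (some (PySem.Str.len p)) none = f) ↔ s = p ++ f := by
  rw [← String.toList_inj (s₁ := PySem.Str.slice s (some (PySem.Str.len p)) none),
      ← String.toList_inj (s₁ := s)]
  simp [PySem.Str.startswith_eq, PySem.Chars.startswith_iff, PySem.Str.toList_slice,
    PySem.Chars.slice_eq_listSlice, PySem.Str.len_eq, PySem.List.slice_from_natCast]
  constructor
  · rintro ⟨⟨t, ht⟩, h2⟩
    rw [← ht] at h2 ⊢; simp at h2; simp [h2]
  · rintro h; simp [h]

-- the bridge: membership of a candidate in B's bare-name set = A's per-candidate probe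
lemma pv_bridge (files : List String) (f : String) :
    PySem.Set.contains (pvBareB files) f = pvFileExistsAnywhereA files f := by
  rw [Bool.eq_iff_iff]
  rw [PySem.Set.contains_iff]
  unfold pvBareB pvFileExistsAnywhereA pvSubdirsA
  simp only [PySem.Set.mem_ofList, List.mem_flatMap, List.mem_map, List.mem_filter,
    List.any_eq_true, List.contains_eq_mem, decide_eq_true_eq]
  constructor
  · rintro ⟨s, hs, p, ⟨hp, hstart⟩, hslice⟩
    exact ⟨p, hp, by rwa [← (pv_strip_eq_iff s p f).mp ⟨hstart, hslice⟩]⟩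
  · rintro ⟨p, hp, hmem⟩
    obtain ⟨hstart, hslice⟩ := (pv_strip_eq_iff (p ++ f) p f).mpr rfl
    exact ⟨p ++ f, hmem, p, ⟨hp, hstart⟩, hslice⟩

-- isdisjoint(bare, alts) = not any(a in bare for a in alts)
lemma pv_isdisjoint_eq (s : PySem.Set String) (xs : List String) :
    PySem.Set.isdisjoint s xs = !(xs.any (fun x => PySem.Set.contains s x)) := by
  rw [Bool.eq_iff_iff, PySem.Set.isdisjoint_iff]
  simp only [Bool.not_eq_eq_eq_not, Bool.not_true, List.any_eq_false,
    PySem.Set.contains_iff]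
  constructor
  · intro h x hx hmem; exact h x hmem hx
  · intro h x hx hmem; exact h x hmem hx

-- ===== VERDICT (by name: the statement is the Claim_ definition above) =====
theorem validate_critical_files_py_spec : Claim_equal_validate_critical_files_py := by
  intro files pt _
  unfold Spec_validate_critical_files_py validate_critical_files_py
    validate_critical_files_py_alt pvConfigA pvChecksB
  simp only [pv_isdisjoint_eq, pv_bridge]
  by_cases h1 : pt == "node"
  · cases hA : pvFileExistsAnywhereA files "package.json" <;>
      simp [h1, hA, pvRenderB]
  · by_cases h2 : pt == "vite"
    · cases hA : pvFileExistsAnywhereA files "package.json" <;>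
        cases hB : pvFileExistsAnywhereA files "vite.config.ts" <;>
        cases hC : pvFileExistsAnywhereA files "vite.config.js" <;>
        simp [h1, h2, hA, hB, hC, pvRenderB]
    · by_cases h3 : pt == "python"
      · cases hA : pvFileExistsAnywhereA files "requirements.txt" <;>
          cases hB : pvFileExistsAnywhereA files "pyproject.toml" <;>
          cases hC : pvFileExistsAnywhereA files "setup.py" <;>
          simp [h1, h2, h3, hA, hB, hC, pvRenderB]
      · by_cases h4 : pt == "java"
        · cases hA : pvFileExistsAnywhereA files "pom.xml" <;>
            cases hB : pvFileExistsAnywhereA files "build.gradle" <;>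
            cases hC : pvFileExistsAnywhereA files "build.gradle.kts" <;>
            simp [h1, h2, h3, h4, hA, hB, hC, pvRenderB]
        · by_cases h5 : pt == "go"
          · cases hA : pvFileExistsAnywhereA files "go.mod" <;>
              simp [h1, h2, h3, h4, h5, hA, pvRenderB]
          · by_cases h6 : pt == "static"
            · cases hA : pvFileExistsAnywhereA files "index.html" <;>
                simp [h1, h2, h3, h4, h5, h6, hA, pvRenderB]
            · cases hA : pvFileExistsAnywhereA files "package.json" <;>
                simp [h1, h2, h3, h4, h5, h6, hA, pvRenderB]
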